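-- pv_equiv track=rewrite | github.com/whatever60/sgad | src/sgad/alignment_parser/_common.py | wrap_alignment
-- ===== SOURCE A (Python) =====
-- def wrap_alignment(top: str, mid: str, bot: str, line_width: int | None) -> str:
--     """Wrap a 3-line alignment to *line_width* columns (same semantics as to_ascii).
--
--     Args:
--         top: Top strand string.
--         mid: Middle (pairing) string.
--         bot: Bottom strand string.
--         line_width: Column limit; ``None`` or ``≤ 0`` disables wrapping.
--
--     Returns:
--         Formatted alignment string ending with ``'\\n'``.
--     """
--     if line_width is None or line_width <= 0:
--         return f"{top}\n{mid}\n{bot}\n"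
--     blocks: list[str] = []
--     for k in range(0, len(top), line_width):
--         blocks.append(top[k : k + line_width])
--         blocks.append(mid[k : k + line_width])
--         blocks.append(bot[k : k + line_width])
--         blocks.append("")
--     return "\n".join(blocks).rstrip() + "\n"
-- ===== SOURCE B (Python) =====
-- def wrap_alignment(top: str, mid: str, bot: str, line_width: int | None) -> str:
--     """Wrap a 3-line alignment to *line_width* columns.
--
--     Single destructive pass: peel the leading line_width columns off all
--     three strands at a time, appending each block straight onto the output
--     string; no index arithmetic, no block list, no join.
--     """
--     if line_width is None or line_width <= 0:
--         return f"{top}\n{mid}\n{bot}\n"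
--     out = ""
--     while top:
--         out += top[:line_width] + "\n" + mid[:line_width] + "\n" + bot[:line_width] + "\n\n"
--         top = top[line_width:]
--         mid = mid[line_width:]
--         bot = bot[line_width:]
--     return out.rstrip() + "\n"
-- ===== Notes on version B (the rewrite author's own statement) =====
-- stated objective: alternative
-- what changed: Replaces A's index loop over range(0, len(top), w) that appends four slices per block into one flat list joined by newline with a single destructive pass that repeatedly peels the leading w columns off the three strands and appends each finished block directly onto the output string (no index arithmetic, no block list, no join).
import Mathlib
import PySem

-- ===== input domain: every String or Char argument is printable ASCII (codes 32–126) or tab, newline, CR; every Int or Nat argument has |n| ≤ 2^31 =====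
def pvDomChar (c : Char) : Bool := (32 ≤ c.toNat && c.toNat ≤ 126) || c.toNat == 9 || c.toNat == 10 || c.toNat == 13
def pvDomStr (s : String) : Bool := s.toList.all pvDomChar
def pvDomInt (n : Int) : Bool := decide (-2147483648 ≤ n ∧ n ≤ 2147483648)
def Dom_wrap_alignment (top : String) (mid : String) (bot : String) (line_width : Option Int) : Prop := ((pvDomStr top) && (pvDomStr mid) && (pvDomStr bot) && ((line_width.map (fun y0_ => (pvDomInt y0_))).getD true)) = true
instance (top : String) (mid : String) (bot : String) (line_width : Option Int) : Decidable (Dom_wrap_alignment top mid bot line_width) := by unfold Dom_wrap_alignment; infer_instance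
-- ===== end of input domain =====

-- B replaces A's index loop over range(0, len(top), w) that appends four slices per
-- block into one flat list joined by "\n" with a single destructive pass that peels the
-- leading w columns off the three strands and appends each block straight onto the
-- output string (objective: alternative decomposition, same cost).

-- ===== PORT A =====
def wrap_alignment (top : String) (mid : String) (bot : String) (line_width : Option Int) : String :=
  match line_width with
  | none => top ++ "\n" ++ mid ++ "\n" ++ bot ++ "\n"
  | some w =>
    if w ≤ 0 then top ++ "\n" ++ mid ++ "\n" ++ bot ++ "\n"
    else
      let blocks : List String :=
        (PySem.List.pyRange 0 (PySem.Str.len top) w).foldl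
          (fun acc k =>
            acc ++ [PySem.Str.slice top (some k) (some (k + w)),
                    PySem.Str.slice mid (some k) (some (k + w)),
                    PySem.Str.slice bot (some k) (some (k + w)),
                    ""]) []
      PySem.Str.rstrip (PySem.Str.join "\n" blocks) ++ "\n"

-- ===== PORT B =====
-- B's while loop 'while top: out += top[:w]+"\n"+mid[:w]+"\n"+bot[:w]+"\n\n"; top=top[w:]; …'.
-- The loop runs only with w ≥ 1, so the width is carried as wm1 = w - 1 (width wm1+1),
-- which gives the kernel the termination measure; the slices top[:w] / top[w:] on a
-- positive w are exactly List.take w / List.drop w on the code points.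
def wrapAccum (wm1 : Nat) (t m b acc : List Char) : List Char :=
  if _h : t = [] then acc
  else
    wrapAccum wm1 (t.drop (wm1+1)) (m.drop (wm1+1)) (b.drop (wm1+1))
      (acc ++ t.take (wm1+1) ++ '\n' :: m.take (wm1+1) ++ '\n' :: b.take (wm1+1) ++ ['\n', '\n'])
termination_by t.length
decreasing_by
  have : 0 < t.length := List.length_pos_iff.mpr _h
  simp only [List.length_drop]; omega

def wrap_alignment_alt (top : String) (mid : String) (bot : String) (line_width : Option Int) : String :=
  match line_width with
  | none => top ++ "\n" ++ mid ++ "\n" ++ bot ++ "\n"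
  | some w =>
    if w ≤ 0 then top ++ "\n" ++ mid ++ "\n" ++ bot ++ "\n"
    else
      PySem.Str.rstrip
        (String.ofList (wrapAccum (w.toNat - 1) top.toList mid.toList bot.toList [])) ++ "\n"

-- ===== PRECONDITION & SPEC =====
def Spec_wrap_alignment (top : String) (mid : String) (bot : String) (line_width : Option Int) (out : String) : Prop := out = wrap_alignment_alt top mid bot line_width
instance (top : String) (mid : String) (bot : String) (line_width : Option Int) (out : String) : Decidable (Spec_wrap_alignment top mid bot line_width out) := by unfold Spec_wrap_alignment; infer_instance

-- ===== CLAIM (what is proved, stated in full; the proofs are below) =====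
def Claim_equal_wrap_alignment : Prop := ∀ (top : String) (mid : String) (bot : String) (line_width : Option Int), Dom_wrap_alignment top mid bot line_width → Spec_wrap_alignment top mid bot line_width (wrap_alignment top mid bot line_width)

-- ===== LEMMAS AND PROOFS =====

-- A's block list, in List-Char form: slices of width wm1+1 taken at offsets (wm1+1)*j.
def blockF (wm1 : Nat) (t m b : List Char) : List (List Char) :=
  (List.range ((t.length + wm1) / (wm1 + 1))).flatMap
    (fun j => [(t.drop ((wm1+1)*j)).take (wm1+1),
               (m.drop ((wm1+1)*j)).take (wm1+1),
               (b.drop ((wm1+1)*j)).take (wm1+1),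
               ([] : List Char)])

theorem blockF_nil (wm1 : Nat) (m b : List Char) : blockF wm1 [] m b = [] := by
  simp [blockF, Nat.div_eq_of_lt]

theorem numB_succ (wm1 n : Nat) (hn : 1 ≤ n) :
    (n + wm1) / (wm1 + 1) = ((n - (wm1 + 1)) + wm1) / (wm1 + 1) + 1 := by
  rw [Nat.div_eq_sub_div (Nat.succ_pos wm1) (by omega)]
  by_cases h : wm1 + 1 ≤ n
  · congr 2; omega
  · have h1 : n + wm1 - (wm1 + 1) = n - 1 := by omega
    have h2 : n - (wm1 + 1) = 0 := by omega
    rw [h1, h2]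
    rw [Nat.div_eq_of_lt (by omega), Nat.div_eq_of_lt (by omega)]

theorem blockF_cons (wm1 : Nat) (t m b : List Char) (h : t ≠ []) :
    blockF wm1 t m b =
      t.take (wm1+1) :: m.take (wm1+1) :: b.take (wm1+1) :: ([] : List Char) ::
        blockF wm1 (t.drop (wm1+1)) (m.drop (wm1+1)) (b.drop (wm1+1)) := by
  have hlen : 1 ≤ t.length := List.length_pos_iff.mpr h
  unfold blockF
  rw [numB_succ wm1 t.length hlen, List.length_drop, List.range_succ_eq_map,
      List.flatMap_cons, List.flatMap_map]
  simp only [Nat.mul_zero, List.drop_zero, Nat.succ_eq_add_one,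
    List.cons_append, List.nil_append]
  congr 4
  apply List.flatMap_congr
  intro j _
  rw [List.drop_drop, List.drop_drop, List.drop_drop]
  have e : (wm1+1)*(j+1) = (wm1+1) + (wm1+1)*j := by ring
  rw [e]

theorem rstrip_append_newline (cs : List Char) :
    PySem.Chars.rstrip (cs ++ ['\n']) = PySem.Chars.rstrip cs := by
  simp [PySem.Chars.rstrip, PySem.Chars.isspace]

-- B's accumulator loop produces exactly A's "\n"-joined flat block list, plus one
-- trailing '\n' whenever there is at least one block.
theorem wrapAccum_eq (wm1 : Nat) :
    ∀ (n : Nat) (t m b acc : List Char), t.length = n →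
      wrapAccum wm1 t m b acc =
        acc ++ PySem.Chars.join ['\n'] (blockF wm1 t m b) ++
          (if t = [] then [] else ['\n']) := by
  intro n
  induction n using Nat.strong_induction_on with
  | _ n ih =>
    intro t m b acc hn
    by_cases h : t = []
    · subst h
      rw [wrapAccum, dif_pos rfl, blockF_nil, PySem.Chars.join_nil]
      simp
    · have hlen : 0 < t.length := List.length_pos_iff.mpr h
      rw [wrapAccum, dif_neg h]
      have hlt : (t.drop (wm1+1)).length < n := by
        rw [List.length_drop]; omega
      rw [ih _ hlt (t.drop (wm1+1)) (m.drop (wm1+1)) (b.drop (wm1+1)) _ rfl]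
      rw [blockF_cons wm1 t m b h]
      by_cases hd : t.drop (wm1+1) = []
      · rw [hd, blockF_nil]
        simp [PySem.Chars.join_cons_cons, PySem.Chars.join_singleton, PySem.Chars.join_nil, h]
      · rw [blockF_cons wm1 _ _ _ hd, if_neg hd, if_neg h]
        simp [PySem.Chars.join_cons_cons]

-- A's pyRange-indexed slice blocks are blockF.
theorem A_blocks (w : Int) (hw : 0 < w) (t m b : List Char) :
    ((PySem.List.pyRange 0 (t.length : Int) w).flatMap fun k =>
        [PySem.List.slice t (some k) (some (k + w)),
         PySem.List.slice m (some k) (some (k + w)),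
         PySem.List.slice b (some k) (some (k + w)),
         ([] : List Char)]) = blockF (w.toNat - 1) t m b := by
  obtain ⟨W, rfl⟩ : ∃ W : Nat, w = (W : Int) := ⟨w.toNat, (Int.toNat_of_nonneg hw.le).symm⟩
  have hW1 : 1 ≤ W := by omega
  have h2 : W - 1 + 1 = W := by omega
  simp only [Int.toNat_natCast]
  rw [PySem.List.pyRange_of_pos _ _ hw, List.flatMap_map]
  by_cases hl : t.length = 0
  · have ht : t = [] := List.length_eq_zero_iff.mp hl
    rw [ht, blockF_nil]
    simp
  · have hpos : (0:Int) < (t.length : Int) := by omega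
    rw [if_pos hpos]
    have hcnt : (((t.length : Int) - 0 + (W:Int) - 1) / (W:Int)).toNat =
        (t.length + (W - 1)) / (W - 1 + 1) := by
      have h1 : (t.length : Int) - 0 + (W:Int) - 1 = ((t.length + (W - 1) : Nat) : Int) := by
        push_cast; omega
      rw [h1, h2, ← Int.natCast_div, Int.toNat_natCast]
    unfold blockF
    rw [hcnt]
    congr 1
    funext j
    have e : ∀ (l : List Char),
        PySem.List.slice l (some (0 + (W:Int) * (j:Int))) (some (0 + (W:Int) * (j:Int) + (W:Int))) =
          (l.drop ((W - 1 + 1) * j)).take (W - 1 + 1) := by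
      intro l
      have h3 : (0 + (W:Int) * (j:Int)) = ((W * j : Nat) : Int) := by push_cast; ring
      rw [h3, PySem.List.slice_natCast_add, h2]
    rw [e t, e m, e b]

theorem wrap_eq (top mid bot : String) (w : Int) (hw : ¬ w ≤ 0) :
    wrap_alignment top mid bot (some w) = wrap_alignment_alt top mid bot (some w) := by
  have hw' : 0 < w := by omega
  unfold wrap_alignment wrap_alignment_alt
  simp only [if_neg hw]
  rw [← String.toList_inj]
  rw [String.toList_append, String.toList_append, PySem.Str.toList_rstrip,
      PySem.Str.toList_rstrip, String.toList_ofList]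
  rw [PySem.List.foldl_append_eq_flatMap, List.nil_append, PySem.Str.toList_join]
  rw [List.map_flatMap]
  simp only [List.map_cons, List.map_nil, PySem.Str.toList_slice,
    PySem.Chars.slice_eq_listSlice, PySem.Str.len_eq]
  have hb := A_blocks w hw' top.toList mid.toList bot.toList
  have hs : ("" : String).toList = ([] : List Char) := rfl
  rw [hs, hb]
  rw [wrapAccum_eq (w.toNat - 1) top.toList.length top.toList mid.toList bot.toList [] rfl,
      List.nil_append]
  have hsep : ("\n" : String).toList = ['\n'] := rfl
  by_cases ht : top.toList = []
  · rw [if_pos ht, ht, blockF_nil]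
    simp [PySem.Chars.join_nil]

  · rw [if_neg ht]
    simp only [String.toList_ofList]
    rw [rstrip_append_newline, hsep]

-- ===== VERDICT (by name: the statement is the Claim_ definition above) =====
theorem wrap_alignment_spec : Claim_equal_wrap_alignment := by
  intro top mid bot lw _
  unfold Spec_wrap_alignment
  match lw with
  | none => rfl
  | some w =>
    by_cases hw : w ≤ 0
    · unfold wrap_alignment wrap_alignment_alt
      simp [if_pos hw]
    · exact wrap_eq top mid bot w hw
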